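-- pv_equiv track=rewrite | github.com/FunkyJ/CSCA20-B20 | extra_practice.py | count_base
-- ===== SOURCE A (Python) =====
-- def count_base(dna_sequence, base):
--     """(str, str) -> int
--
--     Return the number of times base appears in dna_sequence, in either
--     half.
--
--     Parameters:
--       dna_sequence : a representation of the DNA sequence
--       base : one of 'A', 'a', 'T', 't', 'C', 'c', 'G', 'g'
--
--       >>> count_base('', 'a')            # boundary case: empty
--       0
--       >>> count_base('T', 't')           # boundary case: singleton
--       1
--       >>> count_base('gcGCc', 'a')       # typical case: does not appear
--       0
--       >>> count_base('TcACc', 'c')       # typical case: appears in one half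
--       3
--       >>> count_base('TcACc', 'C')       # typical case: upper case
--       3
--       >>> count_base('TACgtACGaCGT', 'a')# typical case: appears in both halves
--       6
--
--     """
--
--     count = 0
--     if base in 'aAtT':
--         for gene in dna_sequence:
--             if gene in 'aAtT':
--                 count += 1
--     elif base in 'cCgG':
--         for gene in dna_sequence:
--             if gene in 'cCgG':
--                 count += 1
--     return count
-- ===== SOURCE B (Python) =====
-- def count_base(dna_sequence, base):
--     if base in 'aAtT':
--         bases = 'aAtT'
--     elif base in 'cCgG':
--         bases = 'cCgG'
--     else:
--         return 0
--     return sum(dna_sequence.count(c) for c in bases)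
-- ===== Notes on version B (the rewrite author's own statement) =====
-- stated objective: alternative
-- what changed: Instead of one membership-testing pass over the sequence with an increment accumulator, B resolves the base class once and sums str.count over the four class characters, scanning the sequence per target character.
import Mathlib
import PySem

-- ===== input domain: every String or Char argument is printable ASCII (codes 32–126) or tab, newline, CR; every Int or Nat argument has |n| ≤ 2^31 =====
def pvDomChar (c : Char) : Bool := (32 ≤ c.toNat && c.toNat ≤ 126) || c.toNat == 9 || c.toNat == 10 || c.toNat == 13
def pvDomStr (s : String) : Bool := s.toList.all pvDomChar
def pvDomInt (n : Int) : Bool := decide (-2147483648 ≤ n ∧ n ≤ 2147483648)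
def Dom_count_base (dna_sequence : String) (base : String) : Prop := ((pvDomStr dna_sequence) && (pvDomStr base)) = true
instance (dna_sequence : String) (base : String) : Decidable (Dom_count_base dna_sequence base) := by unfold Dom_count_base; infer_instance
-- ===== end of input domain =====

-- B resolves the base class once, then sums per-character str.count over the four class characters instead of a single membership-testing pass; alternative decomposition, same cost.


-- ===== PORT A =====
-- literal transliteration: count = 0; branch on substring tests; loop over the sequence incrementing on membership
def count_base (dna_sequence : String) (base : String) : Int :=
  let count : Int := 0
  if PySem.Str.isIn base "aAtT" then
    dna_sequence.toList.foldl
      (fun count gene => if PySem.Chars.isIn [gene] "aAtT".toList then count + 1 else count) count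
  else if PySem.Str.isIn base "cCgG" then
    dna_sequence.toList.foldl
      (fun count gene => if PySem.Chars.isIn [gene] "cCgG".toList then count + 1 else count) count
  else count

-- ===== PORT B =====
-- literal transliteration of Source B: pick the class string, else return 0; then sum dna_sequence.count(c) over its characters
def count_base_alt (dna_sequence : String) (base : String) : Int :=
  if PySem.Str.isIn base "aAtT" then
    ("aAtT".toList.map (fun c => (PySem.Str.count dna_sequence (String.ofList [c]) : Int))).sum
  else if PySem.Str.isIn base "cCgG" then
    ("cCgG".toList.map (fun c => (PySem.Str.count dna_sequence (String.ofList [c]) : Int))).sum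
  else 0

-- ===== PRECONDITION & SPEC =====
def Spec_count_base (dna_sequence : String) (base : String) (out : Int) : Prop := out = count_base_alt dna_sequence base
instance (dna_sequence : String) (base : String) (out : Int) : Decidable (Spec_count_base dna_sequence base out) := by unfold Spec_count_base; infer_instance

-- ===== CLAIM (what is proved, stated in full; the proofs are below) =====
def Claim_equal_count_base : Prop := ∀ (dna_sequence : String) (base : String), Dom_count_base dna_sequence base → Spec_count_base dna_sequence base (count_base dna_sequence base)

-- ===== LEMMAS AND PROOFS =====

-- a one-character substring test is membership
theorem isIn_singleton (g : Char) (l : List Char) :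
    PySem.Chars.isIn [g] l = decide (g ∈ l) := by
  by_cases h : g ∈ l
  · simp only [h, decide_true]
    rw [PySem.Chars.isIn_iff_infix]
    obtain ⟨s, t, rfl⟩ := List.append_of_mem h
    exact ⟨s, t, by simp⟩
  · simp only [h, decide_false]
    rw [PySem.Chars.isIn_eq_false_iff]
    intro hi
    exact h (hi.subset (List.mem_singleton_self g))

-- Chars.count of a single-character pattern is List.count
theorem countGo_single (c : Char) (l : List Char) (fuel acc : Nat) (h : l.length ≤ fuel) :
    PySem.Chars.count.go [c] fuel l acc = acc + l.count c := by
  induction l generalizing fuel acc with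
  | nil => cases fuel <;> simp [PySem.Chars.count.go]
  | cons x t ih =>
    cases fuel with
    | zero => simp at h
    | succ f =>
      simp only [PySem.Chars.count.go]
      by_cases hx : c = x
      · subst hx
        simp only [List.isPrefixOf, beq_self_eq_true, Bool.true_and,
          if_true, List.length_singleton, List.drop_one, List.tail_cons, List.count_cons_self]
        rw [ih _ _ (by simp at h; omega)]; omega
      · simp [List.isPrefixOf, Ne.symm hx, hx]
        rw [ih _ _ (by simp at h; omega)]

theorem count_single (l : List Char) (c : Char) : PySem.Chars.count l [c] = l.count c := by
  simp only [PySem.Chars.count, List.isEmpty_cons, if_false, Bool.false_eq_true]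
  exact (countGo_single c l l.length 0 le_rfl).trans (Nat.zero_add _)

theorem countP_mem_cons (l t : List Char) (c : Char) (hc : c ∉ t) :
    l.countP (fun g => decide (g ∈ c :: t)) = l.countP (fun x => x == c) + l.countP (fun g => decide (g ∈ t)) := by
  induction l with
  | nil => simp
  | cons x xs ih =>
    simp only [List.countP_cons, ih]
    by_cases hx : x = c
    · subst hx; simp [hc]; omega
    · by_cases hm : x ∈ t <;> simp [hx, hm] <;> omega

theorem countP_mem_sum (l cs : List Char) (h : cs.Nodup) :
    l.countP (fun g => decide (g ∈ cs)) = (cs.map (fun c => l.count c)).sum := by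
  induction cs with
  | nil => simp
  | cons c t ih =>
    simp only [List.nodup_cons] at h
    rw [List.map_cons, List.sum_cons, ← ih h.2, countP_mem_cons l t c h.1, List.count]

-- the membership-counting loop of A equals B's sum of per-character counts, for a duplicate-free class string
theorem loop_eq_sum (l cs : List Char) (h : cs.Nodup) :
    l.foldl (fun count gene => if PySem.Chars.isIn [gene] cs then count + 1 else count) (0 : Int)
      = (cs.map (fun c => (l.count c : Int))).sum := by
  have h1 : (fun (count : Int) gene => if PySem.Chars.isIn [gene] cs then count + 1 else count)
      = fun count gene => if (fun g => decide (g ∈ cs)) gene then count + 1 else count := by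
    funext count gene; rw [isIn_singleton]
  rw [h1, PySem.List.foldl_if_add_one, countP_mem_sum l cs h]
  simp [Function.comp_def]

-- ===== VERDICT (by name: the statement is the Claim_ definition above) =====
theorem count_base_spec : Claim_equal_count_base := by
  intro dna_sequence base _
  show count_base dna_sequence base = count_base_alt dna_sequence base
  unfold count_base count_base_alt
  split_ifs
  · rw [loop_eq_sum _ _ (by decide)]; simp [count_single]
  · rw [loop_eq_sum _ _ (by decide)]; simp [count_single]
  · rfl
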